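-- pv_equiv track=rewrite | github.com/yogiadi/dasknocomment | dask/array/rechunk.py_no_comments.py | merge_to_number
-- ===== SOURCE A (Python) =====
-- import heapq
--
-- def merge_to_number(desired_chunks, max_number):
--
--     if len(desired_chunks) <= max_number:
--         return desired_chunks
--     distinct = set(desired_chunks)
--     if len(distinct) == 1:
--         # Fast path for homogeneous target, also ensuring a regular result
--         w = distinct.pop()
--         n = len(desired_chunks)
--         total = n * w
--         desired_width = total // max_number
--         width = w * (desired_width // w)
--         adjust = (total - max_number * width) // w
--         return (width + w,) * adjust + (width,) * (max_number - adjust)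
--     desired_width = sum(desired_chunks) // max_number
--     nmerges = len(desired_chunks) - max_number
--     heap = [
--         (desired_chunks[i] + desired_chunks[i + 1], i, i + 1)
--         for i in range(len(desired_chunks) - 1)
--     ]
--     heapq.heapify(heap)
--     chunks = list(desired_chunks)
--     while nmerges > 0:
--         # Find smallest interval to merge
--         width, i, j = heapq.heappop(heap)
--         # If interval was made invalid by another merge, recompute
--         # it, re-insert it and retry.
--         if chunks[j] == 0:
--             j += 1
--             while chunks[j] == 0:
--                 j += 1
--             heapq.heappush(heap, (chunks[i] + chunks[j], i, j))
--             continue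
--         elif chunks[i] + chunks[j] != width:
--             heapq.heappush(heap, (chunks[i] + chunks[j], i, j))
--             continue
--         # Merge
--         assert chunks[i] != 0
--         chunks[i] = 0  # mark deleted
--         chunks[j] = width
--         nmerges -= 1
--     return tuple(filter(None, chunks))
-- ===== SOURCE B (Python) =====
-- def merge_to_number(desired_chunks, max_number):
--     if len(desired_chunks) <= max_number:
--         return desired_chunks
--     if max_number < 1 or any(c <= 0 for c in desired_chunks):
--         raise ValueError("chunk widths must be positive and max_number at least 1")
--     distinct = set(desired_chunks)
--     if len(distinct) == 1:
--         # Fast path for homogeneous target, also ensuring a regular result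
--         w = distinct.pop()
--         n = len(desired_chunks)
--         total = n * w
--         desired_width = total // max_number
--         width = w * (desired_width // w)
--         adjust = (total - max_number * width) // w
--         return (width + w,) * adjust + (width,) * (max_number - adjust)
--     # Direct greedy scan: repeatedly merge the leftmost adjacent pair
--     # with the minimum combined width (min() keeps the first minimum).
--     chunks = list(desired_chunks)
--     for _ in range(len(desired_chunks) - max_number):
--         k = min(range(len(chunks) - 1), key=lambda i: chunks[i] + chunks[i + 1])
--         chunks[k + 1] += chunks[k]
--         del chunks[k]
--     return tuple(chunks)
-- ===== Notes on version B (the rewrite author's own statement) =====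
-- stated objective: simpler
-- what changed: Replaces the lazy-invalidation binary heap with a direct greedy scan over a plain list that repeatedly merges the leftmost adjacent pair of minimum combined width, and validates its domain (raises ValueError on nonpositive chunk widths or max_number < 1 when merging is needed); Pre_ excludes exactly those validated-away inputs, where A raises (assert/IndexError/ZeroDivisionError on zero chunks or max_number <= 0) or, for negative chunks, returns a value produced by accidental stale-heap pop order and zero-sum filtering.
-- outside the precondition, e.g. on merge_to_number((3, -3), 1): A returns (), B raises ValueError; on merge_to_number((9, -4, -2, -2, 8, -1), 2): A returns (1, 7), B raises ValueError; on merge_to_number((0, 5, 3), 1): A raises AssertionError, B raises ValueError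
import Mathlib
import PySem

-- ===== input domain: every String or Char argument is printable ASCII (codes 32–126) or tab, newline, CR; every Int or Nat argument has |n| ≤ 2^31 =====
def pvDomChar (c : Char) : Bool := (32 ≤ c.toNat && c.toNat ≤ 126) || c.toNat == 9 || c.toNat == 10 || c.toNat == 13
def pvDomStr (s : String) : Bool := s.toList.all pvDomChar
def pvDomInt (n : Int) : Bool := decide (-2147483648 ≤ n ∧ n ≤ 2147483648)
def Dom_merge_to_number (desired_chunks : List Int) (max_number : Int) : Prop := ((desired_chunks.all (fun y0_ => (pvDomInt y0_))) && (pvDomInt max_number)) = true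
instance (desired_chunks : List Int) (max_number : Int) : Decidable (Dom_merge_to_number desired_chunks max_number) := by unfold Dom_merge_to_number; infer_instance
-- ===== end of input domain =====

-- B replaces A's lazy-invalidation heap by a direct greedy scan that repeatedly merges the
-- leftmost adjacent pair of minimum combined width, and validates its domain (it raises
-- ValueError on nonpositive chunk widths / max_number < 1, where A raises or its value is an
-- accident of the stale heap) (objective: simpler; no speed claim).

-- ===== PORT A =====
-- Shared fast path of both Pythons (identical code in Source A and Source B): homogeneous chunks.
def homogeneousFill (w : Int) (n : Nat) (max_number : Int) : List Int :=
  let total : Int := (n : Int) * w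
  let desired_width := PySem.Int.floordiv total max_number   -- ZeroDivision (max_number = 0) excluded by Pre_
  let width := w * (PySem.Int.floordiv desired_width w)      -- ZeroDivision (w = 0) excluded by Pre_
  let adjust := PySem.Int.floordiv (total - max_number * width) w
  -- tuple * count: negative count gives the empty tuple, exactly List.replicate ∘ toNat
  List.replicate adjust.toNat (width + w) ++ List.replicate (max_number - adjust).toNat width

-- heapq ported by hand as an ordered list: Python's tuple `<` is lexicographic; A observes the
-- heap only through heappop = minimum, which this ordered insertion makes the head (exact here:
-- every comparison heapq performs is this same lexicographic order on (Int,Int,Int) triples).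
def tripLeB (a b : Int × Int × Int) : Bool :=
  a.1 < b.1 || (a.1 == b.1 && (a.2.1 < b.2.1 || (a.2.1 == b.2.1 && a.2.2 ≤ b.2.2)))

def hpush : List (Int × Int × Int) → (Int × Int × Int) → List (Int × Int × Int)
  | [], e => [e]
  | x :: t, e => if tripLeB e x then e :: x :: t else x :: hpush t e

-- heapq.heapify: afterwards pops come in lexicographic order; as an ordered list
def hinit (l : List (Int × Int × Int)) : List (Int × Int × Int) := l.foldl hpush []

-- the inner `while chunks[j] == 0: j += 1` (fuel covers every in-range advance; none = IndexError)
def findNZ (cs : List Int) : Nat → Int → Option Int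
  | 0, _ => none
  | f + 1, j =>
    match PySem.List.pyGet? cs j with
    | none => none
    | some c => if c = 0 then findNZ cs f (j + 1) else some j

-- the `while nmerges > 0` loop; fuel-bounded (the proof shows the fuel given below suffices
-- on Pre_); none = a Python exception (IndexError / AssertionError / heappop on empty) or fuel
def loopA : Nat → List Int → List (Int × Int × Int) → Int → Option (List Int)
  | 0, _, _, _ => none
  | f + 1, cs, heap, nm =>
    if nm ≤ 0 then some cs
    else
      match heap with
      | [] => none                                   -- heappop from an empty heap: IndexError
      | (w, i, j) :: rest =>
        match PySem.List.pyGet? cs j with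
        | none => none
        | some cj =>
          if cj = 0 then
            match findNZ cs (cs.length + 1) (j + 1) with
            | none => none
            | some j' =>
              match PySem.List.pyGet? cs i, PySem.List.pyGet? cs j' with
              | some ci, some cj' => loopA f cs (hpush rest (ci + cj', i, j')) nm
              | _, _ => none
          else
            match PySem.List.pyGet? cs i with
            | none => none
            | some ci =>
              if ci + cj ≠ w then loopA f cs (hpush rest (ci + cj, i, j)) nm
              else if ci = 0 then none               -- `assert chunks[i] != 0` failing
              else
                match PySem.List.pySet? cs i 0 with
                | none => none
                | some cs1 =>
                  match PySem.List.pySet? cs1 j w with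
                  | none => none
                  | some cs2 => loopA f cs2 rest (nm - 1)

def merge_to_number (desired_chunks : List Int) (max_number : Int) : List Int :=
  if PySem.List.len desired_chunks ≤ max_number then desired_chunks
  else
    let distinct := PySem.Set.ofList desired_chunks
    if distinct.length = 1 then
      homogeneousFill (distinct.headD 0) desired_chunks.length max_number
    else
      -- `desired_width = sum(desired_chunks) // max_number` is computed and never used by A;
      -- its ZeroDivisionError (max_number = 0) is excluded by Pre_
      let _desired_width := PySem.Int.floordiv desired_chunks.sum max_number
      let nmerges : Int := PySem.List.len desired_chunks - max_number
      let heap0 := hinit ((List.range (desired_chunks.length - 1)).map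
        (fun k => (desired_chunks.getD k 0 + desired_chunks.getD (k + 1) 0, (k : Int), (k : Int) + 1)))
      match loopA ((desired_chunks.length + 1) * (desired_chunks.length + 1)) desired_chunks heap0 nmerges with
      | some cs => cs.filter (fun c => c ≠ 0)        -- tuple(filter(None, chunks))
      | none => []                                   -- A raised here; excluded by Pre_

-- ===== PORT B =====
-- min(range(len(l)-1), key=lambda i: l[i]+l[i+1]): leftmost adjacent pair of minimum sum
def bFindMin : List Int → Option (Nat × Int)
  | a :: b :: rest =>
    match bFindMin (b :: rest) with
    | none => some (0, a + b)
    | some (k, s') => if a + b ≤ s' then some (0, a + b) else some (k + 1, s')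
  | _ => none                                        -- fewer than two chunks: min() would raise

-- one merge: chunks[k+1] += chunks[k]; del chunks[k]
def bStep (l : List Int) : List Int :=
  match bFindMin l with
  | none => l
  | some (k, s) => l.take k ++ s :: l.drop (k + 2)

def bLoop : Nat → List Int → List Int
  | 0, l => l
  | t + 1, l => bLoop t (bStep l)

def merge_to_number_alt (desired_chunks : List Int) (max_number : Int) : List Int :=
  if PySem.List.len desired_chunks ≤ max_number then desired_chunks
  else if max_number < 1 ∨ desired_chunks.any (fun c => c ≤ 0) then
    []                                               -- raise ValueError; excluded by Pre_
  else
    let distinct := PySem.Set.ofList desired_chunks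
    if distinct.length = 1 then
      homogeneousFill (distinct.headD 0) desired_chunks.length max_number
    else
      bLoop (PySem.List.len desired_chunks - max_number).toNat desired_chunks

-- ===== PRECONDITION & SPEC =====
-- Chunk widths are positive sizes; Pre_ excludes inputs (when merging is needed, i.e.
-- len > max_number) with nonpositive chunks or max_number < 1, which B validates away with a
-- ValueError: there A raises (AssertionError/IndexError on zero chunks,
-- ZeroDivisionError/IndexError for max_number ≤ 0) or, for negative chunks, A returns a value
-- produced by its accidental stale-heap pop order and zero-sum filtering.
def Pre_merge_to_number (desired_chunks : List Int) (max_number : Int) : Prop :=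
  PySem.List.len desired_chunks ≤ max_number ∨ (1 ≤ max_number ∧ ∀ c ∈ desired_chunks, 0 < c)
instance (desired_chunks : List Int) (max_number : Int) : Decidable (Pre_merge_to_number desired_chunks max_number) := by
  unfold Pre_merge_to_number; infer_instance

def pvWitness_merge_to_number : List Int × Int := ([5, 3, 4, 1, 2], 3)

def Spec_merge_to_number (desired_chunks : List Int) (max_number : Int) (out : List Int) : Prop := out = merge_to_number_alt desired_chunks max_number
instance (desired_chunks : List Int) (max_number : Int) (out : List Int) : Decidable (Spec_merge_to_number desired_chunks max_number out) := by unfold Spec_merge_to_number; infer_instance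

-- ===== CLAIM (what is proved, stated in full; the proofs are below) =====
def Claim_equal_merge_to_number : Prop := ∀ (desired_chunks : List Int) (max_number : Int), Dom_merge_to_number desired_chunks max_number → Pre_merge_to_number desired_chunks max_number → Spec_merge_to_number desired_chunks max_number (merge_to_number desired_chunks max_number)


-- ===== LEMMAS AND PROOFS =====

-- `c ≠ 0` filter used by both ports (A's final tuple(filter(None, …)), B's survivor list)
def surv (cs : List Int) : List Int := cs.filter (fun c => c ≠ 0)

-- k is a live ("survivor") position of the zero-marked list
def nz (cs : List Int) (k : Nat) : Prop := k < cs.length ∧ cs.getD k 0 ≠ 0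

-- b is the next survivor strictly after a
def nextS (cs : List Int) (a b : Nat) : Prop :=
  a < b ∧ nz cs b ∧ ∀ t, a < t → t < b → cs.getD t 0 = 0

-- all elements nonnegative (true on Pre_ and preserved by merging)
def Pos (cs : List Int) : Prop := ∀ x ∈ cs, 0 ≤ x

-- heap entry sanity: indices are cast Nats, left index live, right index at most the next
-- survivor, stored width at most the current pair sum
def EntOK (cs : List Int) (e : Int × Int × Int) : Prop :=
  ∃ a b j2 : Nat, e.2.1 = (a : Int) ∧ e.2.2 = (b : Int) ∧ nz cs a ∧ a < b ∧
    nextS cs a j2 ∧ b ≤ j2 ∧ e.1 ≤ cs.getD a 0 + cs.getD j2 0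

def HInv (cs : List Int) (heap : List (Int × Int × Int)) : Prop :=
  heap.Pairwise (fun a b => tripLeB a b = true) ∧
  (∀ e ∈ heap, EntOK cs e) ∧
  (heap.map (fun e => e.2.1)).Nodup ∧
  (∀ a b : Nat, nz cs a → nextS cs a b → ∃ e ∈ heap, e.2.1 = (a : Int))

-- an entry that would pass A's two validity tests unchanged
def accB (cs : List Int) (e : Int × Int × Int) : Bool :=
  decide (0 ≤ e.2.1) && decide (e.2.1.toNat < e.2.2.toNat) &&
  decide (e.2.2.toNat < cs.length) && (cs.getD e.2.2.toNat 0 != 0) &&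
  ((List.range e.2.2.toNat).all (fun t => decide (t ≤ e.2.1.toNat) || (cs.getD t 0 == 0))) &&
  decide (e.1 = cs.getD e.2.1.toNat 0 + cs.getD e.2.2.toNat 0)

def inacc (cs : List Int) (heap : List (Int × Int × Int)) : Nat :=
  heap.countP (fun e => !accB cs e)

def rank (cs : List Int) (a : Nat) : Nat := ((cs.take a).filter (fun c => c ≠ 0)).length

lemma accB_true_iff (cs : List Int) (w : Int) (a b : Nat) :
    accB cs (w, (a : Int), (b : Int)) = true ↔ (nextS cs a b ∧ w = cs.getD a 0 + cs.getD b 0) := by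
  simp only [accB, nextS, nz, Bool.and_eq_true, decide_eq_true_eq, List.all_eq_true,
    List.mem_range, bne_iff_ne, Bool.or_eq_true, beq_iff_eq, Int.toNat_natCast]
  constructor
  · rintro ⟨⟨⟨⟨⟨-, hab⟩, hbl⟩, hnzb⟩, hdead⟩, hw⟩
    refine ⟨⟨hab, ⟨hbl, hnzb⟩, ?_⟩, hw⟩
    intro t hat htb
    rcases hdead t htb with h | h
    · omega
    · exact h
  · rintro ⟨⟨hab, ⟨hbl, hnzb⟩, hdead⟩, hw⟩
    refine ⟨⟨⟨⟨⟨by omega, hab⟩, hbl⟩, hnzb⟩, ?_⟩, hw⟩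
    intro t htb
    by_cases hat : a < t
    · exact Or.inr (hdead t hat htb)
    · exact Or.inl (by omega)


lemma tripLeB_total (a b : Int × Int × Int) : tripLeB a b = false → tripLeB b a = true := by
  rcases a with ⟨w, i, j⟩; rcases b with ⟨w', i', j'⟩
  simp only [tripLeB, Bool.or_eq_true, Bool.and_eq_true, decide_eq_true_eq, beq_iff_eq,
    Bool.or_eq_false_iff, Bool.and_eq_false_iff, decide_eq_false_iff_not, beq_eq_false_iff_ne]
  intro h; omega


lemma tripLeB_trans (a b c : Int × Int × Int) :
    tripLeB a b = true → tripLeB b c = true → tripLeB a c = true := by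
  rcases a with ⟨w, i, j⟩; rcases b with ⟨w', i', j'⟩; rcases c with ⟨w'', i'', j''⟩
  simp only [tripLeB, Bool.or_eq_true, Bool.and_eq_true, decide_eq_true_eq, beq_iff_eq]
  intro h1 h2; omega


lemma tripLeB_elim (w i j w' i' j' : Int) (h : tripLeB (w, i, j) (w', i', j') = true) :
    w < w' ∨ (w = w' ∧ (i < i' ∨ (i = i' ∧ j ≤ j'))) := by
  simp only [tripLeB, Bool.or_eq_true, Bool.and_eq_true, decide_eq_true_eq, beq_iff_eq] at h
  omega


lemma hpush_perm (h : List (Int × Int × Int)) (e : Int × Int × Int) :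
    (hpush h e).Perm (e :: h) := by
  induction h with
  | nil => simp [hpush]
  | cons x t ih =>
    by_cases hx : tripLeB e x = true
    · simp [hpush, hx]
    · simp only [hpush, hx]
      exact (ih.cons x).trans (List.Perm.swap e x t)


lemma hpush_sorted (h : List (Int × Int × Int)) (e : Int × Int × Int)
    (hs : h.Pairwise (fun a b => tripLeB a b = true)) :
    (hpush h e).Pairwise (fun a b => tripLeB a b = true) := by
  induction h with
  | nil => simp [hpush, List.Pairwise.nil]
  | cons x t ih =>
    rcases List.pairwise_cons.mp hs with ⟨hxall, hts⟩
    by_cases hx : tripLeB e x = true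
    · simp only [hpush, hx, if_true]
      refine List.pairwise_cons.mpr ⟨?_, hs⟩
      intro y hy
      rcases List.mem_cons.mp hy with rfl | hy
      · exact hx
      · exact tripLeB_trans _ _ _ hx (hxall y hy)
    · simp only [hpush, hx]
      refine List.pairwise_cons.mpr ⟨?_, ih hts⟩
      intro y hy
      rcases List.mem_cons.mp ((hpush_perm t e).mem_iff.mp hy) with rfl | hy'
      · exact tripLeB_total _ _ (by simpa using hx)
      · exact hxall y hy'


lemma hinit_perm (l : List (Int × Int × Int)) : (hinit l).Perm l := by
  suffices h : ∀ (l : List (Int × Int × Int)) (acc : List (Int × Int × Int)),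
      (l.foldl hpush acc).Perm (acc ++ l) by
    simpa using h l []
  intro l
  induction l with
  | nil => intro acc; simp
  | cons x t ih =>
    intro acc
    simp only [List.foldl_cons]
    refine (ih _).trans (((hpush_perm acc x).append_right t).trans ?_)
    simpa using (List.perm_middle).symm


lemma hinit_sorted (l : List (Int × Int × Int)) :
    (hinit l).Pairwise (fun a b => tripLeB a b = true) := by
  suffices h : ∀ (l : List (Int × Int × Int)) (acc : List (Int × Int × Int)),
      acc.Pairwise (fun a b => tripLeB a b = true) →
      (l.foldl hpush acc).Pairwise (fun a b => tripLeB a b = true) by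
    exact h l [] List.Pairwise.nil
  intro l
  induction l with
  | nil => intro acc h; simpa using h
  | cons x t ih => intro acc h; exact ih _ (hpush_sorted _ _ h)


lemma nextS_unique (cs : List Int) (a b b' : Nat) (h1 : nextS cs a b) (h2 : nextS cs a b') :
    b = b' := by
  rcases h1 with ⟨hab, ⟨hbl, hbz⟩, hdead⟩
  rcases h2 with ⟨hab', ⟨hbl', hbz'⟩, hdead'⟩
  by_contra hne
  rcases Nat.lt_or_ge b b' with h | h
  · exact hbz (hdead' b hab h)
  · exact hbz' (hdead b' hab' (by omega))


lemma exists_nextS (cs : List Int) (a b0 : Nat) (hb : nz cs b0) (hab : a < b0) :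
    ∃ j2, nextS cs a j2 := by
  induction b0 using Nat.strong_induction_on with
  | _ b0 ih =>
    by_cases h : ∀ t, a < t → t < b0 → cs.getD t 0 = 0
    · exact ⟨b0, hab, hb, h⟩
    · push Not at h
      rcases h with ⟨t, hat, htb, htz⟩
      obtain ⟨hbl, -⟩ := hb
      exact ih t htb ⟨by omega, htz⟩ hat


lemma pos_getD (cs : List Int) (hp : Pos cs) (k : Nat) : 0 ≤ cs.getD k 0 := by
  by_cases hk : k < cs.length
  · have : cs.getD k 0 ∈ cs := by
      rw [List.getD_eq_getElem cs 0 hk]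
      exact List.getElem_mem hk
    exact hp _ this
  · rw [List.getD_eq_default cs 0 (by omega)]


-- rank: position of survivor a inside surv cs
lemma rank_add (cs : List Int) (a d : Nat) :
    rank cs (a + d) = rank cs a + (((cs.drop a).take d).filter (fun c => c ≠ 0)).length := by
  simp [rank, List.take_add, List.filter_append]

lemma rank_succ (cs : List Int) (a : Nat) (ha : nz cs a) : rank cs (a + 1) = rank cs a + 1 := by
  obtain ⟨hal, haz⟩ := ha
  rw [rank_add, List.drop_eq_getElem_cons hal]
  simp only [List.take_succ_cons, List.take_zero, List.filter_cons]
  rw [List.getD_eq_getElem cs 0 hal] at haz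
  simp [haz]

lemma rank_mono (cs : List Int) (a a' : Nat) (h : a ≤ a') : rank cs a ≤ rank cs a' := by
  have : a' = a + (a' - a) := by omega
  rw [this, rank_add]; omega

lemma surv_cons_ne (c : Int) (cs : List Int) (hc : c ≠ 0) : surv (c :: cs) = c :: surv cs := by
  simp [surv, hc]

lemma surv_cons_eq (cs : List Int) : surv ((0 : Int) :: cs) = surv cs := by
  simp [surv]

lemma nz_cons_succ (c : Int) (cs : List Int) (a : Nat) : nz (c :: cs) (a + 1) ↔ nz cs a := by
  simp only [nz, List.getD_cons_succ, List.length_cons]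
  omega

lemma nextS_cons_succ (c : Int) (cs : List Int) (a b : Nat) :
    nextS (c :: cs) (a + 1) (b + 1) ↔ nextS cs a b := by
  constructor
  · rintro ⟨hab, hb, hdead⟩
    exact ⟨by omega, (nz_cons_succ _ _ _).mp hb,
      fun t hat htb => by simpa using hdead (t + 1) (by omega) (by omega)⟩
  · rintro ⟨hab, hb, hdead⟩
    refine ⟨by omega, (nz_cons_succ _ _ _).mpr hb, fun t hat htb => ?_⟩
    cases t with
    | zero => omega
    | succ t => simpa using hdead t (by omega) (by omega)

lemma rank_cons_succ (c : Int) (cs : List Int) (a : Nat) :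
    rank (c :: cs) (a + 1) = (if c ≠ 0 then 1 else 0) + rank cs a := by
  simp only [rank, List.take_succ_cons, List.filter_cons]
  by_cases hc : c = 0
  · simp [hc]
  · simp [hc]; omega

lemma exists_first_nz (cs : List Int) (h : 1 ≤ (surv cs).length) :
    ∃ b, nz cs b ∧ ∀ t, t < b → cs.getD t 0 = 0 := by
  induction cs with
  | nil => simp [surv] at h
  | cons c cs ih =>
    by_cases hc : c = 0
    · subst hc
      rw [surv_cons_eq] at h
      obtain ⟨b, hb, hdead⟩ := ih h
      refine ⟨b + 1, (nz_cons_succ _ _ _).mpr hb, fun t ht => ?_⟩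
      cases t with
      | zero => simp
      | succ t => simpa using hdead t (by omega)
    · exact ⟨0, ⟨by simp, by simpa using hc⟩, fun t ht => by omega⟩

lemma surv_head_set (w : Int) (cs : List Int) (b : Nat) (hb : b < cs.length)
    (hdead : ∀ t, t < b → cs.getD t 0 = 0) (hnz : cs.getD b 0 ≠ 0) (hw : w ≠ 0) :
    ∃ rest, surv cs = cs.getD b 0 :: rest ∧ surv (cs.set b w) = w :: rest := by
  induction cs generalizing b with
  | nil => simp at hb
  | cons c cs ih =>
    cases b with
    | zero =>
      simp only [List.getD_cons_zero] at hnz ⊢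
      exact ⟨surv cs, surv_cons_ne c cs hnz, by simpa [List.set_cons_zero] using surv_cons_ne w cs hw⟩
    | succ b =>
      have hc : c = 0 := by simpa using hdead 0 (by omega)
      subst hc
      obtain ⟨rest, h1, h2⟩ := ih b (by simpa using hb)
        (fun t ht => by simpa using hdead (t + 1) (by omega)) (by simpa using hnz)
      exact ⟨rest, by simpa [surv_cons_eq] using h1,
        by simpa [List.set_cons_succ, surv_cons_eq] using h2⟩

lemma rank_getElem (cs : List Int) (a : Nat) (ha : nz cs a) :
    (surv cs)[rank cs a]? = some (cs.getD a 0) := by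
  induction cs generalizing a with
  | nil => exact absurd ha.1 (by simp)
  | cons c cs ih =>
    cases a with
    | zero =>
      have hc : c ≠ 0 := by simpa using ha.2
      simp [rank, surv_cons_ne c cs hc]
    | succ a =>
      have ha' : nz cs a := (nz_cons_succ _ _ _).mp ha
      rw [rank_cons_succ]
      by_cases hc : c = 0
      · subst hc; simpa [surv_cons_eq] using ih a ha'
      · rw [surv_cons_ne c cs hc, if_pos hc, Nat.add_comm 1]
        simpa using ih a ha'


lemma rank_nextS (cs : List Int) (a b : Nat) (ha : nz cs a) (hab : nextS cs a b) :
    rank cs b = rank cs a + 1 := by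
  obtain ⟨hab2, hb, hdead⟩ := hab
  have hz : (((cs.drop (a + 1)).take (b - a - 1)).filter (fun c => c ≠ 0)).length = 0 := by
    rw [List.length_eq_zero_iff, List.filter_eq_nil_iff]
    intro x hx
    obtain ⟨i, hi, rfl⟩ := List.mem_iff_getElem.mp hx
    have hi' : a + 1 + i < b := by
      simp only [List.length_take, List.length_drop] at hi; omega
    have hil : a + 1 + i < cs.length := by
      have := hb.1; omega
    have h0 : cs.getD (a + 1 + i) 0 = 0 := hdead _ (by omega) hi'
    rw [List.getD_eq_getElem cs 0 hil] at h0
    simp only [List.getElem_take, List.getElem_drop]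
    simp [h0]
  have hb' : b = (a + 1) + (b - a - 1) := by omega
  rw [hb', rank_add, rank_succ cs a ha]
  omega


lemma rank_lt_of_lt (cs : List Int) (a a' : Nat) (ha : nz cs a) (h : a < a') :
    rank cs a < rank cs a' := by
  have h1 := rank_succ cs a ha
  have h2 := rank_mono cs (a + 1) a' (by omega)
  omega


lemma rank_surj (cs : List Int) (t : Nat) (ht : t + 1 < (surv cs).length) :
    ∃ a b, nz cs a ∧ nextS cs a b ∧ rank cs a = t := by
  induction cs generalizing t with
  | nil => simp [surv] at ht
  | cons c cs ih =>
    by_cases hc : c = 0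
    · subst hc
      rw [surv_cons_eq] at ht
      obtain ⟨a, b, hnz, hnext, hrank⟩ := ih t ht
      exact ⟨a + 1, b + 1, (nz_cons_succ _ _ _).mpr hnz, (nextS_cons_succ _ _ _ _).mpr hnext,
        by simp [rank_cons_succ, hrank]⟩
    · rw [surv_cons_ne c cs hc] at ht
      cases t with
      | zero =>
        obtain ⟨b0, hb0, hdead⟩ := exists_first_nz cs (by simpa using ht)
        refine ⟨0, b0 + 1, ⟨by simp, by simpa using hc⟩, ⟨by omega, (nz_cons_succ _ _ _).mpr hb0, ?_⟩, by simp [rank]⟩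
        intro t h0t htb
        cases t with
        | zero => omega
        | succ t => simpa using hdead t (by omega)
      | succ t =>
        obtain ⟨a, b, hnz, hnext, hrank⟩ := ih t (by simpa using ht)
        exact ⟨a + 1, b + 1, (nz_cons_succ _ _ _).mpr hnz, (nextS_cons_succ _ _ _ _).mpr hnext,
          by simp only [rank_cons_succ, if_pos hc, hrank]; omega⟩


-- the merge step on the zero-marked list, seen through surv
lemma merge_surv (cs : List Int) (a b : Nat) (w : Int) (ha : nz cs a) (hab : nextS cs a b)
    (hw : w ≠ 0) :
    surv ((cs.set a 0).set b w)
      = (surv cs).take (rank cs a) ++ w :: (surv cs).drop (rank cs a + 2) := by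
  induction cs generalizing a b with
  | nil => exact absurd ha.1 (by simp)
  | cons c cs ih =>
    obtain ⟨hab, hbnz, hdead⟩ := hab
    cases a with
    | zero =>
      have hc : c ≠ 0 := by simpa using ha.2
      obtain ⟨b', rfl⟩ : ∃ b', b = b' + 1 := ⟨b - 1, by omega⟩
      have hb'l : b' < cs.length := by simpa using hbnz.1
      have hb'nz : cs.getD b' 0 ≠ 0 := by simpa using hbnz.2
      have hdead' : ∀ t, t < b' → cs.getD t 0 = 0 :=
        fun t ht => by simpa using hdead (t + 1) (by omega) (by omega)
      obtain ⟨rest, h1, h2⟩ := surv_head_set w cs b' hb'l hdead' hb'nz hw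
      rw [List.set_cons_zero, List.set_cons_succ]
      rw [surv_cons_eq, h2]
      simp [rank, surv_cons_ne c cs hc, h1]
    | succ a =>
      have ha' : nz cs a := (nz_cons_succ _ _ _).mp ha
      obtain ⟨b', rfl⟩ : ∃ b', b = b' + 1 := ⟨b - 1, by omega⟩
      have hnext' : nextS cs a b' := (nextS_cons_succ _ _ _ _).mp ⟨hab, hbnz, hdead⟩
      have hih := ih a b' ha' hnext'
      rw [List.set_cons_succ, List.set_cons_succ]
      by_cases hc : c = 0
      · subst hc
        rw [surv_cons_eq, surv_cons_eq, hih, rank_cons_succ]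
        simp
      · rw [surv_cons_ne _ _ hc, surv_cons_ne _ _ hc, hih, rank_cons_succ, if_pos hc,
          Nat.add_comm 1, List.take_succ_cons]
        have h2 : rank cs a + 1 + 2 = (rank cs a + 2) + 1 := by omega
        rw [h2, List.drop_succ_cons]
        simp


lemma getD_merge (cs : List Int) (a b : Nat) (w : Int) (ha : a < cs.length)
    (hb : b < cs.length) (hne : a ≠ b) (k : Nat) :
    ((cs.set a 0).set b w).getD k 0
      = if k = b then w else if k = a then 0 else cs.getD k 0 := by
  have hlen1 : (cs.set a 0).length = cs.length := by simp
  have hlen2 : ((cs.set a 0).set b w).length = cs.length := by simp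
  by_cases hkb : k = b
  · subst hkb
    rw [List.getD_eq_getElem _ 0 (by omega), if_pos rfl]
    rw [List.getElem_set_self]
  · rw [if_neg hkb]
    by_cases hkl : k < cs.length
    · rw [List.getD_eq_getElem _ 0 (by omega), List.getElem_set_ne (by omega)]
      by_cases hka : k = a
      · subst hka
        rw [if_pos rfl, List.getElem_set_self]
      · rw [if_neg hka, List.getElem_set_ne (by omega), List.getD_eq_getElem _ 0 hkl]
    · rw [List.getD_eq_default _ 0 (by omega), if_neg (by omega), List.getD_eq_default _ 0 (by omega)]


lemma bFindMin_cons2 (a b : Int) (r : List Int) : ∃ k s, bFindMin (a :: b :: r) = some (k, s) := by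
  cases hrec : bFindMin (b :: r) with
  | none => exact ⟨0, a + b, by simp [bFindMin, hrec]⟩
  | some p =>
    obtain ⟨k', s'⟩ := p
    by_cases hle : a + b ≤ s'
    · exact ⟨0, a + b, by simp [bFindMin, hrec, hle]⟩
    · exact ⟨k' + 1, s', by simp [bFindMin, hrec, hle]⟩

lemma bFindMin_spec (l : List Int) (k : Nat) (s : Int) (h : bFindMin l = some (k, s)) :
    k + 1 < l.length ∧ s = l.getD k 0 + l.getD (k + 1) 0 ∧
      (∀ t, t + 1 < l.length → s ≤ l.getD t 0 + l.getD (t + 1) 0) ∧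
      (∀ t, t < k → s < l.getD t 0 + l.getD (t + 1) 0) := by
  induction l generalizing k s with
  | nil => simp [bFindMin] at h
  | cons a t ih =>
    match t with
    | [] => simp [bFindMin] at h
    | b :: r =>
      rw [bFindMin] at h
      cases hrec : bFindMin (b :: r) with
      | none =>
        rw [hrec] at h
        obtain ⟨rfl, rfl⟩ : 0 = k ∧ a + b = s := by
          simpa using h
        obtain rfl : r = [] := by
          cases r with
          | nil => rfl
          | cons c r' =>
            obtain ⟨k', s', h'⟩ := bFindMin_cons2 b c r'
            rw [h'] at hrec; cases hrec
        refine ⟨by simp, by simp, ?_, by omega⟩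
        intro t ht
        simp only [List.length_cons, List.length_nil] at ht
        obtain rfl : t = 0 := by omega
        simp
      | some p =>
        obtain ⟨k', s'⟩ := p
        rw [hrec] at h
        obtain ⟨hk', hs', hmin', hleft'⟩ := ih k' s' hrec
        dsimp only at h
        by_cases hle : a + b ≤ s'
        · rw [if_pos hle] at h
          obtain ⟨rfl, rfl⟩ : 0 = k ∧ a + b = s := by simpa using h
          refine ⟨by simp, by simp, ?_, by omega⟩
          intro t ht
          cases t with
          | zero => simp
          | succ t =>
            have := hmin' t (by simpa using ht)
            simp only [List.getD_cons_succ] at this ⊢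
            omega
        · rw [if_neg hle] at h
          obtain ⟨rfl, rfl⟩ : k' + 1 = k ∧ s' = s := by simpa using h
          refine ⟨by simpa using hk', by simpa using hs', ?_, ?_⟩
          · intro t ht
            cases t with
            | zero => simpa using le_of_lt (by omega : s' < a + b)
            | succ t =>
              have := hmin' t (by simpa using ht)
              simp only [List.getD_cons_succ] at this ⊢
              omega
          · intro t ht
            cases t with
            | zero => simpa using (by omega : s' < a + b)
            | succ t =>
              have := hleft' t (by omega)
              simp only [List.getD_cons_succ] at this ⊢
              omega


lemma bFindMin_isSome (l : List Int) (h : 2 ≤ l.length) : ∃ k s, bFindMin l = some (k, s) := by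
  match l with
  | [] => simp at h
  | [a] => simp at h
  | a :: b :: r =>
    obtain ⟨k, s, h'⟩ := bFindMin_cons2 a b r
    exact ⟨k, s, h'⟩


lemma bFindMin_eq (l : List Int) (k : Nat) (hk : k + 1 < l.length)
    (hmin : ∀ t, t + 1 < l.length → l.getD k 0 + l.getD (k + 1) 0 ≤ l.getD t 0 + l.getD (t + 1) 0)
    (hleft : ∀ t, t < k → l.getD k 0 + l.getD (k + 1) 0 < l.getD t 0 + l.getD (t + 1) 0) :
    bFindMin l = some (k, l.getD k 0 + l.getD (k + 1) 0) := by
  obtain ⟨k', s', h'⟩ := bFindMin_isSome l (by omega)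
  obtain ⟨hk', hs', hmin', hleft'⟩ := bFindMin_spec l k' s' h'
  obtain rfl : k' = k := by
    by_contra hne
    rcases Nat.lt_or_ge k' k with hlt | hge
    · have h1 := hleft k' hlt
      have h2 := hmin' k hk
      omega
    · have h1 := hleft' k (by omega)
      have h2 := hmin k' hk'
      omega
  rw [h', hs']


lemma findNZ_eq (cs : List Int) (f s j2 : Nat) (hs : s ≤ j2) (hj : j2 < cs.length)
    (hdead : ∀ t, s ≤ t → t < j2 → cs.getD t 0 = 0) (hnz : cs.getD j2 0 ≠ 0)
    (hf : j2 - s < f) : findNZ cs f (s : Int) = some (j2 : Int) := by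
  induction f generalizing s with
  | zero => omega
  | succ f ih =>
    rw [findNZ]
    have hsl : s < cs.length := by omega
    rw [PySem.List.pyGet?_natCast, List.getElem?_eq_getElem hsl]
    by_cases hsj : s = j2
    · subst hsj
      have hz : cs[s] ≠ 0 := by rw [← List.getD_eq_getElem cs 0 hsl]; exact hnz
      simp [hz]
    · have h0 : cs.getD s 0 = 0 := hdead s (le_refl _) (by omega)
      rw [List.getD_eq_getElem cs 0 hsl] at h0
      simp only [h0]
      have : ((s : Int) + 1) = ((s + 1 : Nat) : Int) := by push_cast; ring
      rw [this]
      exact ih (s + 1) (by omega) (fun t ht1 ht2 => hdead t (by omega) ht2) (by omega)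


lemma heap_len_le (cs : List Int) (heap : List (Int × Int × Int)) (hI : HInv cs heap) :
    heap.length ≤ cs.length := by
  obtain ⟨-, hok, hnd, -⟩ := hI
  have h1 : (heap.map (fun e => e.2.1)).toFinset.card = heap.length := by
    rw [List.toFinset_card_of_nodup hnd, List.length_map]
  have hsub : (heap.map (fun e => e.2.1)).toFinset ⊆
      ((List.range cs.length).map (fun k : Nat => (k : Int))).toFinset := by
    intro x hx
    rw [List.mem_toFinset, List.mem_map] at hx
    obtain ⟨e, he, rfl⟩ := hx
    obtain ⟨a, b, j2, ha1, -, ⟨hal, -⟩, -⟩ := hok e he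
    rw [List.mem_toFinset, List.mem_map]
    exact ⟨a, by simp [List.mem_range, hal], ha1.symm⟩
  have h2 := Finset.card_le_card hsub
  have h3 := List.toFinset_card_le ((List.range cs.length).map (fun k : Nat => (k : Int)))
  simp only [List.length_map, List.length_range] at h3
  omega


lemma surv_eq_self (cs : List Int) (h : ∀ x ∈ cs, 0 < x) : surv cs = cs := by
  rw [surv, List.filter_eq_self]
  intro x hx
  simp only [decide_eq_true_eq]
  have := h x hx; omega


lemma surv_getD_rank (cs : List Int) (a : Nat) (h : nz cs a) :
    (surv cs).getD (rank cs a) 0 = cs.getD a 0 := by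
  rw [List.getD_eq_getElem?_getD, rank_getElem cs a h]
  rfl

lemma rank_lt_len (cs : List Int) (a : Nat) (h : nz cs a) : rank cs a < (surv cs).length := by
  have h' := rank_getElem cs a h
  rw [List.getElem?_eq_some_iff] at h'
  exact h'.1

-- at a valid pop, the heap's minimality makes (a, b) the leftmost minimum adjacent pair of surv
lemma pop_min (cs : List Int) (rest : List (Int × Int × Int)) (w : Int) (a b : Nat)
    (hI : HInv cs ((w, (a : Int), (b : Int)) :: rest))
    (hnza : nz cs a) (hnext : nextS cs a b) (hw : w = cs.getD a 0 + cs.getD b 0) :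
    bFindMin (surv cs) = some (rank cs a, w) := by
  obtain ⟨hsort, hok, hnd, hcov⟩ := hI
  have hnzb := hnext.2.1
  have hrb := rank_nextS cs a b hnza hnext
  have hkb : rank cs b < (surv cs).length := rank_lt_len cs b hnzb
  have hk : rank cs a + 1 < (surv cs).length := by omega
  -- for any position t ≠ rank a there is a strictly dominated heap entry
  have key : ∀ t, t + 1 < (surv cs).length → t ≠ rank cs a →
      (w ≤ (surv cs).getD t 0 + (surv cs).getD (t + 1) 0 ∧
        (t < rank cs a → w < (surv cs).getD t 0 + (surv cs).getD (t + 1) 0)) := by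
    intro t ht htne
    obtain ⟨a', b', hnza', hnext', hrank'⟩ := rank_surj cs t ht
    have hane : a' ≠ a := by
      rintro rfl; exact htne hrank'.symm
    obtain ⟨x, hx, hxp⟩ := hcov a' b' hnza' hnext'
    have hxe : x ≠ (w, (a : Int), (b : Int)) := by
      rintro rfl
      simp only at hxp
      exact hane (by exact_mod_cast hxp.symm)
    have hxrest : x ∈ rest := by
      rcases List.mem_cons.mp hx with rfl | hr
      · exact absurd rfl hxe
      · exact hr
    have hle : tripLeB (w, (a : Int), (b : Int)) x = true :=
      (List.pairwise_cons.mp hsort).1 x hxrest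
    obtain ⟨a'', b'', j2'', h1, h2, hnza'', hab'', hnext'', hbj'', hwle''⟩ := hok x (List.mem_cons_of_mem _ hxrest)
    obtain rfl : a' = a'' := by
      have : ((a'' : Nat) : Int) = ((a' : Nat) : Int) := by rw [← h1, hxp]
      exact_mod_cast this.symm
    obtain rfl : b' = j2'' := (nextS_unique cs a' j2'' b' hnext'' hnext').symm
    have hsum : x.1 ≤ cs.getD a' 0 + cs.getD b' 0 := hwle''
    have helim := tripLeB_elim w (a : Int) (b : Int) x.1 x.2.1 x.2.2 (by simpa using hle)
    have hgt : (surv cs).getD t 0 + (surv cs).getD (t + 1) 0 = cs.getD a' 0 + cs.getD b' 0 := by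
      rw [← hrank', ← rank_nextS cs a' b' hnza' hnext',
        surv_getD_rank cs a' hnza', surv_getD_rank cs b' hnext'.2.1]
    constructor
    · rcases helim with h | ⟨h, -⟩ <;> omega
    · intro htlt
      have haa : a' < a := by
        rcases Nat.lt_trichotomy a' a with h | h | h
        · exact h
        · exact absurd h hane
        · exact absurd (hrank' ▸ rank_lt_of_lt cs a a' hnza h) (by omega)
      have hxa : x.2.1 = (a' : Int) := hxp
      rcases helim with h | ⟨-, h | ⟨h, -⟩⟩
      · omega
      · rw [hxa] at h; exact absurd (by exact_mod_cast h) (by omega)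
      · rw [hxa] at h; exact absurd (by exact_mod_cast h) (by omega)
  have hsa := surv_getD_rank cs a hnza
  have hsb := surv_getD_rank cs b hnzb
  have heq : (surv cs).getD (rank cs a) 0 + (surv cs).getD (rank cs a + 1) 0 = w := by
    rw [hsa, ← hrb, hsb, hw]
  have := bFindMin_eq (surv cs) (rank cs a) hk
    (fun t ht => by
      by_cases htne : t = rank cs a
      · subst htne; omega
      · have := (key t ht htne).1; omega)
    (fun t ht => by
      have := (key t (by omega) (by omega)).2 ht; omega)
  rw [this, heq]

lemma getD_merge_mono (cs : List Int) (a b : Nat) (w : Int) (hal : a < cs.length)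
    (hbl : b < cs.length) (hne : a ≠ b) (hp : Pos cs)
    (hw : w = cs.getD a 0 + cs.getD b 0) (k : Nat) (hk : k ≠ a) :
    cs.getD k 0 ≤ ((cs.set a 0).set b w).getD k 0 := by
  rw [getD_merge cs a b w hal hbl hne k]
  have h1 := pos_getD cs hp a
  by_cases hkb : k = b
  · subst hkb; rw [if_pos rfl]; omega
  · rw [if_neg hkb, if_neg hk]

-- the heap invariant survives a merge
lemma HInv_step (cs : List Int) (rest : List (Int × Int × Int)) (w : Int) (a b : Nat)
    (hI : HInv cs ((w, (a : Int), (b : Int)) :: rest))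
    (hp : Pos cs) (hnza : nz cs a) (hnext : nextS cs a b)
    (hw : w = cs.getD a 0 + cs.getD b 0) (hw0 : w ≠ 0) :
    HInv ((cs.set a 0).set b w) rest := by
  obtain ⟨hsort, hok, hnd, hcov⟩ := hI
  obtain ⟨hab, hnzb, hdead⟩ := hnext
  have hal : a < cs.length := hnza.1
  have hbl : b < cs.length := hnzb.1
  have hne : a ≠ b := by omega
  have G := getD_merge cs a b w hal hbl hne
  have hlen : ((cs.set a 0).set b w).length = cs.length := by simp
  have hnd' : (((w, (a : Int), (b : Int)) :: rest).map (fun e => e.2.1)).Nodup := hnd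
  rw [List.map_cons, List.nodup_cons] at hnd'
  refine ⟨hsort.of_cons, ?_, hnd'.2, ?_⟩
  · intro e' he'
    obtain ⟨a', b', j2', h1, h2, hnza', hab', hnext', hbj', hwle'⟩ := hok e' (List.mem_cons_of_mem _ he')
    have hane : a' ≠ a := by
      intro h
      refine hnd'.1 ?_
      have hm : e'.2.1 ∈ rest.map (fun e => e.2.1) := List.mem_map_of_mem he'
      rw [h1, h] at hm
      simpa using hm
    have hnza2 : nz ((cs.set a 0).set b w) a' := by
      refine ⟨by have h5 := hnext'.2.1.1; simp only [List.length_set]; omega, ?_⟩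
      rw [G a']
      by_cases hab2 : a' = b
      · rw [if_pos hab2]; exact hw0
      · rw [if_neg hab2, if_neg hane]; exact hnza'.2
    by_cases hj2a : j2' = a
    · -- a was a''s next survivor; its next is now b
      refine ⟨a', b', b, h1, h2, hnza2, by omega, ⟨?_, ?_, ?_⟩, by omega, ?_⟩
      · omega
      · refine ⟨by omega, ?_⟩
        rw [G b, if_pos rfl]; exact hw0
      · intro t hat htb
        rw [G t]
        by_cases htb2 : t = b
        · omega
        · rw [if_neg htb2]
          by_cases hta : t = a
          · rw [if_pos hta]
          · rw [if_neg hta]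
            by_cases htla : t < a
            · exact hnext'.2.2 t hat (by omega)
            · exact hdead t (by omega) htb
      · have e1 : ((cs.set a 0).set b w).getD a' 0 = cs.getD a' 0 := by
          rw [G a', if_neg (by omega), if_neg hane]
        have e2 : ((cs.set a 0).set b w).getD b 0 = w := by rw [G b, if_pos rfl]
        have h3 := pos_getD cs hp b
        rw [hj2a] at hwle'
        rw [e1, e2]
        omega
    · -- a''s next survivor is untouched
      refine ⟨a', b', j2', h1, h2, hnza2, hab', ⟨hnext'.1, ?_, ?_⟩, hbj', ?_⟩
      · refine ⟨by have h5 := hnext'.2.1.1; simp only [List.length_set]; omega, ?_⟩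
        rw [G j2']
        by_cases hj2b : j2' = b
        · rw [if_pos hj2b]; exact hw0
        · rw [if_neg hj2b, if_neg hj2a]; exact hnext'.2.1.2
      · intro t hat htj
        rw [G t]
        have htb : t ≠ b := by
          intro h
          apply hnzb.2
          rw [← h]
          exact hnext'.2.2 t hat htj
        rw [if_neg htb]
        by_cases hta : t = a
        · rw [if_pos hta]
        · rw [if_neg hta]; exact hnext'.2.2 t hat htj
      · have e1 := getD_merge_mono cs a b w hal hbl hne hp hw a' hane
        have e2 := getD_merge_mono cs a b w hal hbl hne hp hw j2' hj2a
        omega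
  · intro a'' b'' hnza'' hnext''
    have hane : a'' ≠ a := by
      intro h
      apply hnza''.2
      rw [h, G a, if_neg hne, if_pos rfl]
    have hbne : b'' ≠ a := by
      intro h
      apply hnext''.2.1.2
      rw [h, G a, if_neg hne, if_pos rfl]
    have hnzold : nz cs a'' := by
      refine ⟨by have := hnza''.1; omega, ?_⟩
      intro h
      apply hnza''.2
      rw [G a'']
      by_cases hab2 : a'' = b
      · exact absurd (hab2 ▸ h) hnzb.2
      · rw [if_neg hab2, if_neg hane]; exact h
    have hnzbold : nz cs b'' := by
      refine ⟨by have := hnext''.2.1.1; omega, ?_⟩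
      intro h
      apply hnext''.2.1.2
      rw [G b'']
      by_cases hbb2 : b'' = b
      · exact absurd (hbb2 ▸ h) hnzb.2
      · rw [if_neg hbb2, if_neg hbne]; exact h
    obtain ⟨j2'', hj⟩ := exists_nextS cs a'' b'' hnzbold hnext''.1
    obtain ⟨x, hx, hxp⟩ := hcov a'' j2'' hnzold hj
    rcases List.mem_cons.mp hx with rfl | hr
    · simp only at hxp
      exact absurd (by exact_mod_cast hxp.symm) hane
    · exact ⟨x, hr, hxp⟩

-- the main simulation: A's heap loop computes, through surv, exactly B's greedy loop
lemma loopA_sim (fuel : Nat) (cs : List Int) (heap : List (Int × Int × Int)) (nm : Int)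
    (hI : HInv cs heap) (hp : Pos cs) (h0 : 0 ≤ nm)
    (hcnt : nm + 1 ≤ ((surv cs).length : Int))
    (hf : nm.toNat * (cs.length + 1) + inacc cs heap + 1 ≤ fuel) :
    ∃ cs', loopA fuel cs heap nm = some cs' ∧ surv cs' = bLoop nm.toNat (surv cs) := by
  induction fuel generalizing cs heap nm with
  | zero => omega
  | succ f ih =>
    simp only [loopA]
    by_cases hnm : nm ≤ 0
    · rw [if_pos hnm]
      obtain rfl : nm = 0 := le_antisymm hnm h0
      exact ⟨cs, rfl, by simp [bLoop]⟩
    · rw [if_neg hnm]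
      obtain ⟨hsort, hok, hnd, hcov⟩ := hI
      cases heap with
      | nil =>
        exfalso
        obtain ⟨a, b, hnza, hnext, -⟩ := rank_surj cs 0 (by omega)
        obtain ⟨e, he, -⟩ := hcov a b hnza hnext
        exact absurd he (List.not_mem_nil)
      | cons e rest =>
        obtain ⟨w, i, j⟩ := e
        obtain ⟨a, b, j2, h1, h2, hnza, habI, hnext, hbj2, hwle⟩ := hok _ (List.mem_cons_self)
        simp only at h1 h2
        subst h1; subst h2
        obtain ⟨hj2a, hnzj2, hdeadj2⟩ := hnext
        have hblen : b < cs.length := by have := hnzj2.1; omega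
        have hj2len : j2 < cs.length := hnzj2.1
        have halen : a < cs.length := hnza.1
        have hgb : cs.getD b 0 = cs[b] := List.getD_eq_getElem cs 0 hblen
        have hga : cs.getD a 0 = cs[a] := List.getD_eq_getElem cs 0 halen
        have hgj2 : cs.getD j2 0 = cs[j2] := List.getD_eq_getElem cs 0 hj2len
        have hsort' := hsort.of_cons
        have hndc := hnd
        rw [List.map_cons, List.nodup_cons] at hndc
        have hlenrest : rest.length + 1 ≤ cs.length := by
          have := heap_len_le cs ((w, (a : Int), (b : Int)) :: rest) ⟨hsort, hok, hnd, hcov⟩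
          simpa using this
        dsimp only
        rw [PySem.List.pyGet?_natCast, List.getElem?_eq_getElem hblen]
        dsimp only
        by_cases hcb : cs[b] = 0
        · -- lazy-invalidation retry: the stored right index is dead, advance it
          rw [if_pos hcb]
          have hbj2' : b < j2 := by
            rcases Nat.eq_or_lt_of_le hbj2 with h | h
            · exfalso; apply hnzj2.2; rw [← h, hgb]; exact hcb
            · exact h
          have hfind : findNZ cs (cs.length + 1) ((b : Int) + 1) = some (j2 : Int) := by
            have hc : ((b : Int) + 1) = ((b + 1 : Nat) : Int) := by push_cast; ring
            rw [hc]
            exact findNZ_eq cs (cs.length + 1) (b + 1) j2 (by omega) hj2len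
              (fun t ht1 ht2 => hdeadj2 t (by omega) ht2) hnzj2.2 (by omega)
          rw [hfind]
          dsimp only
          rw [PySem.List.pyGet?_natCast, PySem.List.pyGet?_natCast,
            List.getElem?_eq_getElem hj2len, List.getElem?_eq_getElem halen]
          dsimp only
          have hperm := hpush_perm rest (cs[a] + cs[j2], (a : Int), (j2 : Int))
          have hI2 : HInv cs (hpush rest (cs[a] + cs[j2], (a : Int), (j2 : Int))) := by
            refine ⟨hpush_sorted rest _ hsort', ?_, ?_, ?_⟩
            · intro x hx
              rcases List.mem_cons.mp (hperm.mem_iff.mp hx) with rfl | hr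
              · exact ⟨a, j2, j2, rfl, rfl, hnza, hj2a, ⟨hj2a, hnzj2, hdeadj2⟩, le_refl _,
                  by rw [hga, hgj2]⟩
              · exact hok x (List.mem_cons_of_mem _ hr)
            · have := (hperm.map (fun e => e.2.1)).nodup_iff
              rw [this]
              simpa using hnd
            · intro a' b' h1' h2'
              obtain ⟨x, hx, hxp⟩ := hcov a' b' h1' h2'
              rcases List.mem_cons.mp hx with rfl | hr
              · exact ⟨(cs[a] + cs[j2], (a : Int), (j2 : Int)),
                  hperm.mem_iff.mpr List.mem_cons_self, by simpa using hxp⟩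
              · exact ⟨x, hperm.mem_iff.mpr (List.mem_cons_of_mem _ hr), hxp⟩
          have hacc_e : accB cs (w, (a : Int), (b : Int)) = false := by
            cases h : accB cs (w, (a : Int), (b : Int))
            · rfl
            · exfalso
              obtain ⟨⟨-, ⟨-, hzb⟩, -⟩, -⟩ := (accB_true_iff cs w a b).mp h
              exact hzb (hgb ▸ hcb)
          have hacc_new : accB cs (cs[a] + cs[j2], (a : Int), (j2 : Int)) = true :=
            (accB_true_iff cs _ a j2).mpr ⟨⟨hj2a, hnzj2, hdeadj2⟩, by rw [hga, hgj2]⟩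
          have hcount : inacc cs (hpush rest (cs[a] + cs[j2], (a : Int), (j2 : Int))) + 1
              = inacc cs ((w, (a : Int), (b : Int)) :: rest) := by
            rw [inacc, inacc, hperm.countP_eq, List.countP_cons, List.countP_cons]
            simp [hacc_e, hacc_new]
          exact ih cs _ nm hI2 hp h0 hcnt (by omega)
        · rw [if_neg hcb]
          rw [PySem.List.pyGet?_natCast, List.getElem?_eq_getElem halen]
          dsimp only
          obtain rfl : b = j2 := by
            rcases Nat.eq_or_lt_of_le hbj2 with h | h
            · exact h
            · exact absurd (hgb ▸ hdeadj2 b habI h) hcb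
          by_cases hsum : cs[a] + cs[b] ≠ w
          · -- lazy-invalidation retry: the stored width is stale, reinsert the corrected entry
            rw [if_pos hsum]
            have hperm := hpush_perm rest (cs[a] + cs[b], (a : Int), (b : Int))
            have hI2 : HInv cs (hpush rest (cs[a] + cs[b], (a : Int), (b : Int))) := by
              refine ⟨hpush_sorted rest _ hsort', ?_, ?_, ?_⟩
              · intro x hx
                rcases List.mem_cons.mp (hperm.mem_iff.mp hx) with rfl | hr
                · exact ⟨a, b, b, rfl, rfl, hnza, habI, ⟨hj2a, hnzj2, hdeadj2⟩, le_refl _,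
                    by rw [hga, hgb]⟩
                · exact hok x (List.mem_cons_of_mem _ hr)
              · have := (hperm.map (fun e => e.2.1)).nodup_iff
                rw [this]
                simpa using hnd
              · intro a' b' h1' h2'
                obtain ⟨x, hx, hxp⟩ := hcov a' b' h1' h2'
                rcases List.mem_cons.mp hx with rfl | hr
                · exact ⟨(cs[a] + cs[b], (a : Int), (b : Int)),
                    hperm.mem_iff.mpr List.mem_cons_self, by simpa using hxp⟩
                · exact ⟨x, hperm.mem_iff.mpr (List.mem_cons_of_mem _ hr), hxp⟩
            have hacc_e : accB cs (w, (a : Int), (b : Int)) = false := by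
              cases h : accB cs (w, (a : Int), (b : Int))
              · rfl
              · exfalso
                obtain ⟨-, hwe⟩ := (accB_true_iff cs w a b).mp h
                exact hsum (by rw [← hga, ← hgb, ← hwe])
            have hacc_new : accB cs (cs[a] + cs[b], (a : Int), (b : Int)) = true :=
              (accB_true_iff cs _ a b).mpr ⟨⟨hj2a, hnzj2, hdeadj2⟩, by rw [hga, hgb]⟩
            have hcount : inacc cs (hpush rest (cs[a] + cs[b], (a : Int), (b : Int))) + 1
                = inacc cs ((w, (a : Int), (b : Int)) :: rest) := by
              rw [inacc, inacc, hperm.countP_eq, List.countP_cons, List.countP_cons]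
              simp [hacc_e, hacc_new]
            exact ih cs _ nm hI2 hp h0 hcnt (by omega)
          · -- the merge
            rw [if_neg hsum]
            have hca : cs[a] ≠ 0 := by rw [← hga]; exact hnza.2
            rw [if_neg hca]
            rw [PySem.List.pySet?_natCast cs a 0 halen]
            dsimp only
            rw [PySem.List.pySet?_natCast (cs.set a 0) b w (by simpa using hblen)]
            dsimp only
            have hw : w = cs.getD a 0 + cs.getD b 0 := by
              rw [hga, hgb]; omega
            have hpa : 0 < cs.getD a 0 := by
              have := pos_getD cs hp a
              have := hnza.2
              omega
            have hpb : 0 < cs.getD b 0 := by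
              have := pos_getD cs hp b
              have hb2 := hnzj2.2
              omega
            have hw0 : w ≠ 0 := by omega
            have hnextab : nextS cs a b := ⟨habI, hnzj2, hdeadj2⟩
            have hI2 := HInv_step cs rest w a b ⟨hsort, hok, hnd, hcov⟩ hp hnza hnextab hw hw0
            have hp2 : Pos ((cs.set a 0).set b w) := by
              intro x hx
              rcases List.mem_or_eq_of_mem_set hx with hx1 | rfl
              · rcases List.mem_or_eq_of_mem_set hx1 with hx2 | rfl
                · exact hp x hx2
                · exact le_refl 0
              · omega
            have hms := merge_surv cs a b w hnza hnextab hw0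
            have hpm := pop_min cs rest w a b ⟨hsort, hok, hnd, hcov⟩ hnza hnextab hw
            have hklt : rank cs a + 1 < (surv cs).length := by
              have h1' := rank_nextS cs a b hnza hnextab
              have h2' := rank_lt_len cs b hnzj2
              omega
            have hrle : rank cs a ≤ (surv cs).length := by omega
            have hlen2 : (surv ((cs.set a 0).set b w)).length + 1 = (surv cs).length := by
              rw [hms]
              simp only [List.length_append, List.length_take, List.length_cons,
                List.length_drop]
              omega
            have hcs2len : ((cs.set a 0).set b w).length = cs.length := by simp
            obtain ⟨cs', hrun, hsurv⟩ := ih ((cs.set a 0).set b w) rest (nm - 1) hI2 hp2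
              (by omega) (by omega)
              (by
                have hic : inacc ((cs.set a 0).set b w) rest ≤ rest.length :=
                  List.countP_le_length
                have hnmt : nm.toNat = (nm - 1).toNat + 1 := by omega
                have hmul : nm.toNat * (cs.length + 1)
                    = (nm - 1).toNat * (cs.length + 1) + (cs.length + 1) := by
                  rw [hnmt]; ring
                rw [hcs2len]
                omega)
            refine ⟨cs', hrun, ?_⟩
            rw [hsurv]
            have hnmt : nm.toNat = (nm - 1).toNat + 1 := by omega
            rw [hnmt, bLoop]
            congr 1
            rw [bStep, hpm, hms]


lemma HInv_init (dc : List Int) (hpos : ∀ c ∈ dc, 0 < c) (h2 : 2 ≤ dc.length) :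
    HInv dc (hinit ((List.range (dc.length - 1)).map
      (fun k => (dc.getD k 0 + dc.getD (k + 1) 0, (k : Int), (k : Int) + 1)))) := by
  have hperm := hinit_perm ((List.range (dc.length - 1)).map
    (fun k => (dc.getD k 0 + dc.getD (k + 1) 0, (k : Int), (k : Int) + 1)))
  have hnzall : ∀ k, k < dc.length → nz dc k := by
    intro k hk
    refine ⟨hk, ?_⟩
    rw [List.getD_eq_getElem dc 0 hk]
    have := hpos _ (List.getElem_mem hk)
    omega
  refine ⟨hinit_sorted _, ?_, ?_, ?_⟩
  · intro e he
    rw [hperm.mem_iff, List.mem_map] at he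
    obtain ⟨k, hk, rfl⟩ := he
    rw [List.mem_range] at hk
    have hcast : ((k : Int) + 1) = ((k + 1 : Nat) : Int) := by push_cast; ring
    exact ⟨k, k + 1, k + 1, rfl, hcast, hnzall k (by omega), by omega,
      ⟨by omega, hnzall (k + 1) (by omega), fun t h1 h2 => by omega⟩, le_refl _, le_refl _⟩
  · rw [(hperm.map (fun e => e.2.1)).nodup_iff, List.map_map]
    have : ((fun e : Int × Int × Int => e.2.1) ∘
        (fun k : Nat => (dc.getD k 0 + dc.getD (k + 1) 0, (k : Int), (k : Int) + 1)))
        = (fun k : Nat => (k : Int)) := rfl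
    rw [this]
    exact List.nodup_range.map (fun a b h => by exact_mod_cast h)
  · intro a b hnza hnext
    have hb := hnext.2.1.1
    have hab := hnext.1
    refine ⟨(dc.getD a 0 + dc.getD (a + 1) 0, (a : Int), (a : Int) + 1), ?_, rfl⟩
    rw [hperm.mem_iff, List.mem_map]
    exact ⟨a, by rw [List.mem_range]; omega, rfl⟩

-- ===== VERDICT (by name: the statement is the Claim_ definition above) =====
theorem merge_to_number_spec : Claim_equal_merge_to_number := by
  intro dc mn hdom hpre
  unfold Spec_merge_to_number merge_to_number merge_to_number_alt
  by_cases h1 : PySem.List.len dc ≤ mn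
  · rw [if_pos h1, if_pos h1]
  · rw [if_neg h1, if_neg h1]
    have hguard : ¬ (mn < 1 ∨ dc.any (fun c => c ≤ 0)) := by
      rcases hpre with h | ⟨hmn, hpos⟩
      · exact absurd h h1
      · rintro (h | h)
        · omega
        · rw [List.any_eq_true] at h
          obtain ⟨x, hx, hle⟩ := h
          have := hpos x hx
          simp only [decide_eq_true_eq] at hle
          omega
    rw [if_neg hguard]
    by_cases hhom : (PySem.Set.ofList dc).length = 1
    · rw [if_pos hhom, if_pos hhom]
    · rw [if_neg hhom, if_neg hhom]
      dsimp only
      rcases hpre with h | ⟨hmn, hpos⟩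
      · exact absurd h h1
      rw [PySem.List.len_eq] at h1 ⊢
      have hlen2 : 2 ≤ dc.length := by omega
      have hsurv : surv dc = dc := surv_eq_self dc hpos
      have hp : Pos dc := fun x hx => le_of_lt (hpos x hx)
      have hIinit := HInv_init dc hpos hlen2
      have hheaplen : (hinit ((List.range (dc.length - 1)).map
          (fun k => (dc.getD k 0 + dc.getD (k + 1) 0, (k : Int), (k : Int) + 1)))).length
          = dc.length - 1 := by
        rw [(hinit_perm _).length_eq, List.length_map, List.length_range]
      have h0 : 0 ≤ (dc.length : Int) - mn := by omega
      have hcnt : ((dc.length : Int) - mn) + 1 ≤ ((surv dc).length : Int) := by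
        rw [hsurv]; omega
      have htn : ((dc.length : Int) - mn).toNat ≤ dc.length - 1 := by omega
      have hfuel : ((dc.length : Int) - mn).toNat * (dc.length + 1)
            + inacc dc (hinit ((List.range (dc.length - 1)).map
              (fun k => (dc.getD k 0 + dc.getD (k + 1) 0, (k : Int), (k : Int) + 1)))) + 1
          ≤ (dc.length + 1) * (dc.length + 1) := by
        have hi1 : inacc dc (hinit ((List.range (dc.length - 1)).map
            (fun k => (dc.getD k 0 + dc.getD (k + 1) 0, (k : Int), (k : Int) + 1))))
            ≤ dc.length - 1 := by
          rw [inacc]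
          calc List.countP _ _ ≤ _ := List.countP_le_length
            _ = dc.length - 1 := hheaplen
        have hm1 : ((dc.length : Int) - mn).toNat * (dc.length + 1)
            ≤ (dc.length - 1) * (dc.length + 1) := Nat.mul_le_mul_right _ htn
        have hm2 : (dc.length + 1) * (dc.length + 1)
            = (dc.length - 1) * (dc.length + 1) + 2 * (dc.length + 1) := by
          have h3 : dc.length - 1 + 2 = dc.length + 1 := by omega
          calc (dc.length + 1) * (dc.length + 1)
              = (dc.length - 1 + 2) * (dc.length + 1) := by rw [h3]
            _ = (dc.length - 1) * (dc.length + 1) + 2 * (dc.length + 1) := by ring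
        omega
      obtain ⟨cs', hrun, hsurv'⟩ := loopA_sim ((dc.length + 1) * (dc.length + 1)) dc
        (hinit ((List.range (dc.length - 1)).map
          (fun k => (dc.getD k 0 + dc.getD (k + 1) 0, (k : Int), (k : Int) + 1))))
        ((dc.length : Int) - mn) hIinit hp h0 hcnt hfuel
      rw [hrun]
      dsimp only
      calc cs'.filter (fun c => c ≠ 0) = surv cs' := rfl
        _ = bLoop ((dc.length : Int) - mn).toNat (surv dc) := hsurv'
        _ = bLoop ((dc.length : Int) - mn).toNat dc := by rw [hsurv]
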